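-- pv_equiv track=rewrite | github.com/jesusvilela/connection_laplacian_lean | findings/round6/stage2_fuzzer_A/sheaf_gamma/fuzz.py | all_coboundaries_set
-- ===== SOURCE A (Python) =====
-- def vertex_coboundary_basis(n: int, edges):
--     """For each vertex v, mask of edges incident to v (equals delta({v}))."""
--     m = len(edges)
--     out = [0] * n
--     for i, (u, v) in enumerate(edges):
--         out[u] |= (1 << i)
--         out[v] |= (1 << i)
--     return out
--
-- def all_coboundaries_set(n: int, edges):
--     """Return frozenset of all coboundary bitmasks (2^{|V|-#pi0} of them).
--
--     We compute the row-space spanned by the per-vertex coboundaries over GF(2).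
--     """
--     v_masks = vertex_coboundary_basis(n, edges)
--     # Gaussian-elim independence: pivot on each incoming mask.
--     basis = []  # list of (mask, pivot_bit)
--     for m in v_masks:
--         mm = m
--         for (b, pv) in basis:
--             if (mm >> pv) & 1:
--                 mm ^= b
--         if mm == 0:
--             continue
--         # pivot = lowest set bit
--         pv = (mm & -mm).bit_length() - 1
--         basis.append((mm, pv))
--     # Enumerate span (dimension = len(basis))
--     masks = {0}
--     for (b, _pv) in basis:
--         masks = masks | {w ^ b for w in masks}
--     return masks, len(basis)
-- ===== SOURCE B (Python) =====
-- def all_coboundaries_set(n, edges):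
--     """Return (set of all coboundary bitmasks, dimension of the span).
--
--     One incremental pass: fold each vertex coboundary mask into the growing
--     span directly (doubling it when the mask is new), instead of first running
--     Gaussian elimination to a pivot basis and then enumerating the span.
--     """
--     incidence = [0] * n
--     for i, (u, v) in enumerate(edges):
--         incidence[u] |= 1 << i
--         incidence[v] |= 1 << i
--     span = {0}
--     dim = 0
--     for vec in incidence:
--         if vec not in span:
--             span = span | {w ^ vec for w in span}
--             dim += 1
--     return span, dim
-- ===== Notes on version B (the rewrite author's own statement) =====
-- stated objective: simpler
-- what changed: Replaces the two-phase Gaussian elimination (pivot basis, then span enumeration) by a single incremental pass that folds each vertex mask directly into the growing span set, doubling it exactly when the mask is not already spanned and counting those doublings as the dimension.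
import Mathlib
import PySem

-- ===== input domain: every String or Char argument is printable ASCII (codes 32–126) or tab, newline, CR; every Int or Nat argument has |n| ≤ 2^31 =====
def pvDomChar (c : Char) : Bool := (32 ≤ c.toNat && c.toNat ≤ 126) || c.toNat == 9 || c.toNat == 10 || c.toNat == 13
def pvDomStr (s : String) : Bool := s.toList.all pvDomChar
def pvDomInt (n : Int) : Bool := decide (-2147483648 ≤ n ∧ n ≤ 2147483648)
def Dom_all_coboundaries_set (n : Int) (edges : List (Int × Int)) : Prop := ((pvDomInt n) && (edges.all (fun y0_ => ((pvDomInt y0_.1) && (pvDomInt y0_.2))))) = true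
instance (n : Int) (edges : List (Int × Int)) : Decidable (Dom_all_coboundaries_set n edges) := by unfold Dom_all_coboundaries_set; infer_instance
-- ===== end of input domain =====

-- B replaces A's two-phase Gaussian elimination (pivot basis, then span enumeration) by a single
-- incremental pass folding each vertex mask into the growing span set, counting the doublings as the
-- dimension (objective: simpler). Python returns a *set*; both ports present it in ascending order.


-- ===== PORT A =====
-- out = [0]*n; for i,(u,v) in enumerate(edges): out[u] |= 1<<i; out[v] |= 1<<i
-- (enumerate index i is always ≥ 0, so i.toNat is exactly Python's shift count)
def incStep (out : List Int) (iuv : Int × (Int × Int)) : List Int :=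
  let i := iuv.1; let u := iuv.2.1; let v := iuv.2.2
  let out1 := PySem.List.pySetD out u (PySem.Int.bor (PySem.List.pyGetD out u 0) ((1 : Int) <<< i.toNat))
  PySem.List.pySetD out1 v (PySem.Int.bor (PySem.List.pyGetD out1 v 0) ((1 : Int) <<< i.toNat))

def vertex_coboundary_basis (n : Int) (edges : List (Int × Int)) : List Int :=
  (PySem.List.enumerate edges 0).foldl incStep (List.replicate n.toNat 0)

-- inner loop body: if (mm >> pv) & 1: mm ^= b
def pyReduceStep (mm : Int) (bp : Int × Nat) : Int :=
  if PySem.Int.band (mm >>> bp.2) 1 == 1 then PySem.Int.bxor mm bp.1 else mm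

-- one iteration of A's outer elimination loop (pivot stored as Nat: Python's
-- (mm & -mm).bit_length() - 1 is the same nonnegative integer since mm ≠ 0 there)
def elimFold (basis : List (Int × Nat)) (m : Int) : List (Int × Nat) :=
  let mm := basis.foldl pyReduceStep m
  if mm == 0 then basis
  else basis ++ [(mm, PySem.Int.bitLength (PySem.Int.band mm (-mm)) - 1)]

-- masks = masks | {w ^ b for w in masks}
def spanStep (masks : List Int) (b : Int) : List Int :=
  PySem.Set.union masks (PySem.Set.ofList (masks.map (fun w => PySem.Int.bxor w b)))

def all_coboundaries_set (n : Int) (edges : List (Int × Int)) : List Int × Int :=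
  let v_masks := vertex_coboundary_basis n edges
  let basis := v_masks.foldl elimFold []
  let masks := basis.foldl (fun ms bp => spanStep ms bp.1) (PySem.Set.ofList [0])
  (PySem.List.sorted masks (fun x => x) false, (basis.length : Int))

-- ===== PORT B =====
-- incidence = [0]*n; same accumulation loop (inlined in Source B)
def altIncStep (out : List Int) (iuv : Int × (Int × Int)) : List Int :=
  let i := iuv.1; let u := iuv.2.1; let v := iuv.2.2
  let out1 := PySem.List.pySetD out u (PySem.Int.bor (PySem.List.pyGetD out u 0) ((1 : Int) <<< i.toNat))
  PySem.List.pySetD out1 v (PySem.Int.bor (PySem.List.pyGetD out1 v 0) ((1 : Int) <<< i.toNat))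

def alt_incidence (n : Int) (edges : List (Int × Int)) : List Int :=
  (PySem.List.enumerate edges 0).foldl altIncStep (List.replicate n.toNat 0)

-- if vec not in span: span = span | {w ^ vec for w in span}; dim += 1
def altStep (sd : List Int × Int) (vec : Int) : List Int × Int :=
  if PySem.Set.contains sd.1 vec then sd
  else (PySem.Set.union sd.1 (PySem.Set.ofList (sd.1.map (fun w => PySem.Int.bxor w vec))), sd.2 + 1)

def all_coboundaries_set_alt (n : Int) (edges : List (Int × Int)) : List Int × Int :=
  let sd := (alt_incidence n edges).foldl altStep (PySem.Set.ofList [0], 0)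
  (PySem.List.sorted sd.1 (fun x => x) false, sd.2)

-- ===== PRECONDITION & SPEC =====
-- Pre_ excludes exactly the inputs on which A raises IndexError: an edge endpoint outside
-- Python's index range [-n, n) of the vertex list. A returns on every input inside Pre_.
def Pre_all_coboundaries_set (n : Int) (edges : List (Int × Int)) : Prop :=
  ∀ p ∈ edges, (-n ≤ p.1 ∧ p.1 < n) ∧ (-n ≤ p.2 ∧ p.2 < n)
instance (n : Int) (edges : List (Int × Int)) : Decidable (Pre_all_coboundaries_set n edges) := by unfold Pre_all_coboundaries_set; infer_instance
def pvWitness_all_coboundaries_set : Int × (List (Int × Int)) := (3, [(0, 1), (1, 2)])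

def Spec_all_coboundaries_set (n : Int) (edges : List (Int × Int)) (out : List Int × Int) : Prop := out = all_coboundaries_set_alt n edges
instance (n : Int) (edges : List (Int × Int)) (out : List Int × Int) : Decidable (Spec_all_coboundaries_set n edges out) := by unfold Spec_all_coboundaries_set; infer_instance

-- ===== CLAIM (what is proved, stated in full; the proofs are below) =====
def Claim_equal_all_coboundaries_set : Prop := ∀ (n : Int) (edges : List (Int × Int)), Dom_all_coboundaries_set n edges → Pre_all_coboundaries_set n edges → Spec_all_coboundaries_set n edges (all_coboundaries_set n edges)

-- ===== LEMMAS AND PROOFS =====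

-- ---- xor algebra on PySem.Int.bxor (Python-exact two's-complement xor) ----
theorem pv_bxor_nneg (m k : Nat) : PySem.Int.bxor (m : Int) (-((k : Int) + 1)) = -(((m ^^^ k : Nat) : Int) + 1) := by
  unfold PySem.Int.bxor
  rw [if_pos (by positivity), if_neg (by omega)]
  have h : -(-((k : Int) + 1)) - 1 = (k : Int) := by ring
  rw [h]; simp; ring

theorem pv_bxor_negn (m k : Nat) : PySem.Int.bxor (-((m : Int) + 1)) (k : Int) = -(((m ^^^ k : Nat) : Int) + 1) := by
  unfold PySem.Int.bxor
  rw [if_neg (by omega), if_pos (by positivity)]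
  have h : -(-((m : Int) + 1)) - 1 = (m : Int) := by ring
  rw [h]; simp; ring

theorem pv_bxor_negneg (m k : Nat) : PySem.Int.bxor (-((m : Int) + 1)) (-((k : Int) + 1)) = ((m ^^^ k : Nat) : Int) := by
  unfold PySem.Int.bxor
  rw [if_neg (by omega), if_neg (by omega)]
  have h1 : -(-((m : Int) + 1)) - 1 = (m : Int) := by ring
  have h2 : -(-((k : Int) + 1)) - 1 = (k : Int) := by ring
  rw [h1, h2]; simp

theorem pv_bxor_nneg' (m k : Nat) : PySem.Int.bxor (m : Int) (Int.negSucc k) = Int.negSucc (m ^^^ k) := by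
  rw [Int.negSucc_eq, Int.negSucc_eq, pv_bxor_nneg]

theorem pv_bxor_negn' (m k : Nat) : PySem.Int.bxor (Int.negSucc m) (k : Int) = Int.negSucc (m ^^^ k) := by
  rw [Int.negSucc_eq, Int.negSucc_eq, pv_bxor_negn]

theorem pv_bxor_negneg' (m k : Nat) : PySem.Int.bxor (Int.negSucc m) (Int.negSucc k) = ((m ^^^ k : Nat) : Int) := by
  rw [Int.negSucc_eq, Int.negSucc_eq, pv_bxor_negneg]

theorem pv_bxor_assoc (a b c : Int) :
    PySem.Int.bxor (PySem.Int.bxor a b) c = PySem.Int.bxor a (PySem.Int.bxor b c) := by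
  rcases a with a | a <;> rcases b with b | b <;> rcases c with c | c <;>
    simp only [Int.ofNat_eq_natCast, PySem.Int.bxor_natCast, pv_bxor_nneg', pv_bxor_negn',
      pv_bxor_negneg', Nat.xor_assoc]

theorem pv_bxor_zero_left (a : Int) : PySem.Int.bxor 0 a = a := by
  rw [PySem.Int.bxor_comm, PySem.Int.bxor_zero]

theorem pv_bxor_cancel_right (a b : Int) : PySem.Int.bxor (PySem.Int.bxor a b) b = a := by
  rw [pv_bxor_assoc, PySem.Int.bxor_self, PySem.Int.bxor_zero]

theorem pv_bxor_right_comm (a b c : Int) :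
    PySem.Int.bxor (PySem.Int.bxor a b) c = PySem.Int.bxor (PySem.Int.bxor a c) b := by
  rw [pv_bxor_assoc, pv_bxor_assoc, PySem.Int.bxor_comm b c]

theorem pv_bxor_eq_zero_iff (a b : Int) : PySem.Int.bxor a b = 0 ↔ a = b := by
  constructor
  · intro h
    have := congrArg (fun z => PySem.Int.bxor z b) h
    simpa [pv_bxor_cancel_right, pv_bxor_zero_left] using this
  · rintro rfl; exact PySem.Int.bxor_self a

theorem pv_bxor_nonneg {a b : Int} (ha : 0 ≤ a) (hb : 0 ≤ b) : 0 ≤ PySem.Int.bxor a b := by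
  rw [PySem.Int.bxor_of_nonneg ha hb]; positivity

-- ---- bits of nonnegative ints ----
def tbit (x : Int) (k : Nat) : Bool := x.toNat.testBit k

theorem tbit_zero (k : Nat) : tbit 0 k = false := by simp [tbit]

theorem tbit_bxor {a b : Int} (ha : 0 ≤ a) (hb : 0 ≤ b) (k : Nat) :
    tbit (PySem.Int.bxor a b) k = (tbit a k ^^ tbit b k) := by
  rw [tbit, PySem.Int.bxor_of_nonneg ha hb]
  simp [tbit, Nat.testBit_xor]

theorem pv_testBit_div_mod (m k : Nat) : m.testBit k = decide (m / 2 ^ k % 2 = 1) := by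
  induction k generalizing m with
  | zero => simp [Nat.testBit_zero]
  | succ k ih =>
    rw [Nat.testBit_add_one, ih, Nat.div_div_eq_div_mul]
    rw [show 2 * 2 ^ k = 2 ^ (k + 1) by rw [pow_succ]; ring]

theorem pv_guard_eq {mm : Int} (h : 0 ≤ mm) (k : Nat) :
    (PySem.Int.band (mm >>> k) 1 == 1) = tbit mm k := by
  obtain ⟨m, rfl⟩ : ∃ m : Nat, mm = (m : Int) := ⟨mm.toNat, (Int.toNat_of_nonneg h).symm⟩
  have hs : ((m : Int) >>> k) = ((m >>> k : Nat) : Int) := rfl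
  rw [hs, show (1 : Int) = ((1 : Nat) : Int) from rfl, PySem.Int.band_natCast]
  simp only [tbit, Int.toNat_natCast]
  rw [Nat.and_one_is_mod, Nat.shiftRight_eq_div_pow, pv_testBit_div_mod]
  rcases Nat.mod_two_eq_zero_or_one (m / 2 ^ k) with h2 | h2 <;> simp [h2]

-- trailing-zero count of a positive Nat
def tzN (m : Nat) : Nat :=
  if h : m % 2 = 1 ∨ m = 0 then 0 else tzN (m / 2) + 1
decreasing_by omega

theorem tzN_testBit_self {m : Nat} (h : 0 < m) : m.testBit (tzN m) = true := by
  induction m using Nat.strong_induction_on with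
  | _ m ih =>
    rw [tzN]
    by_cases hc : m % 2 = 1 ∨ m = 0
    · rw [dif_pos hc]
      have : m % 2 = 1 := by omega
      simp [Nat.testBit_zero, this]
    · rw [dif_neg hc]
      rw [Nat.testBit_add_one]
      exact ih (m / 2) (by omega) (by omega)

theorem tzN_testBit_lt {m : Nat} (h : 0 < m) : ∀ t, t < tzN m → m.testBit t = false := by
  induction m using Nat.strong_induction_on with
  | _ m ih =>
    intro t ht
    rw [tzN] at ht
    by_cases hc : m % 2 = 1 ∨ m = 0
    · rw [dif_pos hc] at ht; omega
    · rw [dif_neg hc] at ht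
      cases t with
      | zero => simp [Nat.testBit_zero]; omega
      | succ t =>
        rw [Nat.testBit_add_one]
        exact ih (m / 2) (by omega) (by omega) t (by omega)

theorem pv_and_pred_odd {m : Nat} (h : m % 2 = 1) : m &&& (m - 1) = m - 1 := by
  apply Nat.eq_of_testBit_eq
  intro i
  rw [Nat.testBit_and]
  cases i with
  | zero => simp [Nat.testBit_zero, h]
  | succ i =>
    simp only [Nat.testBit_add_one]
    have h2 : (m - 1) / 2 = m / 2 := by omega
    rw [h2, Bool.and_self]

theorem pv_and_pred_even {m : Nat} (h0 : 0 < m) (h : m % 2 = 0) :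
    m &&& (m - 1) = 2 * ((m / 2) &&& (m / 2 - 1)) := by
  apply Nat.eq_of_testBit_eq
  intro i
  rw [Nat.testBit_and]
  cases i with
  | zero =>
    simp [Nat.testBit_zero, h, Nat.mul_mod_right]
  | succ i =>
    simp only [Nat.testBit_add_one]
    have h1 : (m - 1) / 2 = m / 2 - 1 := by omega
    have h2 : 2 * (m / 2 &&& (m / 2 - 1)) / 2 = m / 2 &&& (m / 2 - 1) := by omega
    rw [h1, h2, Nat.testBit_and]

theorem pv_and_pred_add {m : Nat} (h : 0 < m) : m = (m &&& (m - 1)) + 2 ^ tzN m := by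
  induction m using Nat.strong_induction_on with
  | _ m ih =>
    by_cases hp : m % 2 = 1
    · rw [pv_and_pred_odd hp, tzN, dif_pos (Or.inl hp)]
      omega
    · have h2 : m % 2 = 0 := by omega
      have hq : 0 < m / 2 := by omega
      rw [pv_and_pred_even h h2, tzN, dif_neg (by omega)]
      have := ih (m / 2) (by omega) hq
      rw [pow_succ]
      omega

theorem pv_lowbit_eq {m : Nat} (h : 0 < m) : m - (m &&& (m - 1)) = 2 ^ tzN m := by
  have h2 := pv_and_pred_add h
  generalize hA : m &&& (m - 1) = A at h2 ⊢
  generalize hB : 2 ^ tzN m = B at h2 ⊢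
  omega

theorem pv_lowbit_spec {mm : Int} (h0 : 0 ≤ mm) (hne : mm ≠ 0) :
    tbit mm (PySem.Int.bitLength (PySem.Int.band mm (-mm)) - 1) = true ∧
    ∀ t, t < PySem.Int.bitLength (PySem.Int.band mm (-mm)) - 1 → tbit mm t = false := by
  obtain ⟨m, rfl⟩ : ∃ m : Nat, mm = (m : Int) := ⟨mm.toNat, (Int.toNat_of_nonneg h0).symm⟩
  have hm : 0 < m := by omega
  have hband : PySem.Int.band (m : Int) (-(m : Int)) = ((2 ^ tzN m : Nat) : Int) := by
    unfold PySem.Int.band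
    rw [if_pos (by positivity), if_neg (by omega)]
    have h1 : (-(-(m : Int)) - 1) = ((m - 1 : Nat) : Int) := by omega
    rw [h1]
    simp only [Int.toNat_natCast]
    rw [pv_lowbit_eq hm]
  rw [hband]
  have hbl : PySem.Int.bitLength ((2 ^ tzN m : Nat) : Int) = tzN m + 1 := by
    have hne2 : ((2 ^ tzN m : Nat) : Int) ≠ 0 := by positivity
    have hle := PySem.Int.two_pow_bitLength_le _ hne2
    have hlt := PySem.Int.lt_two_pow_bitLength ((2 ^ tzN m : Nat) : Int)
    rw [Int.natAbs_natCast] at hle hlt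
    have h1 : PySem.Int.bitLength ((2 ^ tzN m : Nat) : Int) - 1 ≤ tzN m :=
      (Nat.pow_le_pow_iff_right (by omega)).mp hle
    have h2 : tzN m < PySem.Int.bitLength ((2 ^ tzN m : Nat) : Int) :=
      (Nat.pow_lt_pow_iff_right (by omega)).mp hlt
    omega
  rw [hbl]
  simp only [Nat.add_sub_cancel, tbit, Int.toNat_natCast]
  exact ⟨tzN_testBit_self hm, tzN_testBit_lt hm⟩

-- ---- GF(2) span of a list of masks ----
inductive InSp : List Int → Int → Prop
  | nil : InSp [] 0
  | skip {L : List Int} {x b : Int} : InSp L x → InSp (b :: L) x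
  | take {L : List Int} {x b : Int} : InSp L x → InSp (b :: L) (PySem.Int.bxor x b)

theorem insp_nil_iff (x : Int) : InSp [] x ↔ x = 0 := by
  constructor
  · intro h; cases h; rfl
  · rintro rfl; exact .nil

theorem insp_cons (b : Int) (K : List Int) (x : Int) :
    InSp (b :: K) x ↔ InSp K x ∨ InSp K (PySem.Int.bxor x b) := by
  constructor
  · intro h
    cases h with
    | skip h => exact Or.inl h
    | take h => right; rwa [pv_bxor_cancel_right]
  · intro h
    rcases h with h | h
    · exact .skip h
    · have := InSp.take (b := b) h
      rwa [pv_bxor_cancel_right] at this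

theorem insp_xor {K : List Int} {x y : Int} (hx : InSp K x) (hy : InSp K y) :
    InSp K (PySem.Int.bxor x y) := by
  induction K generalizing x y with
  | nil =>
    rw [insp_nil_iff] at *
    subst hx; subst hy; simp
  | cons b K ih =>
    rw [insp_cons] at hx hy ⊢
    rcases hx with hx | hx <;> rcases hy with hy | hy
    · exact Or.inl (ih hx hy)
    · right
      have := ih hx hy
      rwa [← pv_bxor_assoc] at this
    · right
      have := ih hx hy
      rwa [pv_bxor_right_comm] at this
    · left
      have := ih hx hy
      have he : PySem.Int.bxor (PySem.Int.bxor x b) (PySem.Int.bxor y b) = PySem.Int.bxor x y := by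
        rw [pv_bxor_right_comm, pv_bxor_assoc, pv_bxor_cancel_right]
      rwa [he] at this

theorem insp_append (K : List Int) (b x : Int) :
    InSp (K ++ [b]) x ↔ InSp K x ∨ InSp K (PySem.Int.bxor x b) := by
  induction K generalizing x with
  | nil => exact insp_cons b [] x
  | cons a K ih =>
    rw [List.cons_append, insp_cons, ih, ih, insp_cons, insp_cons]
    have h : PySem.Int.bxor (PySem.Int.bxor x a) b = PySem.Int.bxor (PySem.Int.bxor x b) a :=
      pv_bxor_right_comm x a b
    rw [h]
    tauto

theorem insp_absorb {K : List Int} {b : Int} (h : InSp K b) (x : Int) :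
    InSp (K ++ [b]) x ↔ InSp K x := by
  rw [insp_append]
  constructor
  · intro hx
    rcases hx with hx | hx
    · exact hx
    · have := insp_xor hx h
      rwa [pv_bxor_cancel_right] at this
  · exact Or.inl

theorem insp_nonneg {K : List Int} (hK : ∀ b ∈ K, 0 ≤ b) {x : Int} (h : InSp K x) : 0 ≤ x := by
  induction h with
  | nil => omega
  | @skip L y b hL ih => exact ih (fun c hc => hK c (List.mem_cons_of_mem _ hc))
  | @take L y b hL ih =>
    exact pv_bxor_nonneg (ih (fun c hc => hK c (List.mem_cons_of_mem _ hc))) (hK b List.mem_cons_self)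

theorem insp_tbit_false {K : List Int} {p : Nat} (hK : ∀ b ∈ K, 0 ≤ b ∧ tbit b p = false)
    {x : Int} (h : InSp K x) : tbit x p = false := by
  induction h with
  | nil => exact tbit_zero p
  | @skip L y b hL ih => exact ih (fun c hc => hK c (List.mem_cons_of_mem _ hc))
  | @take L y b hL ih =>
    have hb := hK b List.mem_cons_self
    have hy : 0 ≤ y := insp_nonneg (fun c hc => (hK c (List.mem_cons_of_mem _ hc)).1) hL
    rw [tbit_bxor hy hb.1, ih (fun c hc => hK c (List.mem_cons_of_mem _ hc)), hb.2]
    rfl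

-- ---- the pivot-structure invariant of A's basis ----
inductive Good : List (Int × Nat) → Prop
  | nil : Good []
  | cons {b : Int} {pv : Nat} {rest : List (Int × Nat)} :
      0 ≤ b → tbit b pv = true → (∀ t, t < pv → tbit b t = false) →
      (∀ bp ∈ rest, tbit bp.1 pv = false) → Good rest → Good ((b, pv) :: rest)

theorem good_append {basis : List (Int × Nat)} (hg : Good basis) {mm : Int} {pv : Nat}
    (hmn : 0 ≤ mm) (h1 : tbit mm pv = true) (h2 : ∀ t, t < pv → tbit mm t = false)
    (hcl : ∀ bp ∈ basis, tbit mm bp.2 = false) :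
    Good (basis ++ [(mm, pv)]) := by
  induction hg with
  | nil => exact .cons hmn h1 h2 (by simp) .nil
  | @cons b q rest hb ht hlow hrest hgrest ih =>
    refine .cons hb ht hlow ?_ (ih (fun bp hbp => hcl bp (List.mem_cons_of_mem _ hbp)))
    intro bp hbp
    rcases List.mem_append.mp hbp with h | h
    · exact hrest bp h
    · simp at h
      subst h
      exact hcl (b, q) List.mem_cons_self

theorem reduce_nonneg {basis : List (Int × Nat)} (hnn : ∀ bp ∈ basis, 0 ≤ bp.1) :
    ∀ m : Int, 0 ≤ m → 0 ≤ basis.foldl pyReduceStep m := by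
  induction basis with
  | nil => intro m hm; exact hm
  | cons bp rest ih =>
    intro m hm
    have hm' : 0 ≤ pyReduceStep m bp := by
      unfold pyReduceStep
      split
      · exact pv_bxor_nonneg hm (hnn bp List.mem_cons_self)
      · exact hm
    exact ih (fun c hc => hnn c (List.mem_cons_of_mem _ hc)) _ hm'

theorem reduce_insp (basis : List (Int × Nat)) :
    ∀ m : Int, InSp (basis.map Prod.fst) (PySem.Int.bxor (basis.foldl pyReduceStep m) m) := by
  induction basis with
  | nil =>
    intro m
    simp only [List.foldl_nil, List.map_nil, PySem.Int.bxor_self]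
    exact .nil
  | cons bp rest ih =>
    intro m
    simp only [List.foldl_cons, List.map_cons]
    by_cases hguard : (PySem.Int.band (m >>> bp.2) 1 == 1) = true
    · have hstep : pyReduceStep m bp = PySem.Int.bxor m bp.1 := by
        unfold pyReduceStep; rw [if_pos hguard]
      rw [hstep]
      have := InSp.take (b := bp.1) (ih (PySem.Int.bxor m bp.1))
      have he : PySem.Int.bxor
          (PySem.Int.bxor (rest.foldl pyReduceStep (PySem.Int.bxor m bp.1)) (PySem.Int.bxor m bp.1)) bp.1
          = PySem.Int.bxor (rest.foldl pyReduceStep (PySem.Int.bxor m bp.1)) m := by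
        rw [pv_bxor_assoc, pv_bxor_assoc, PySem.Int.bxor_self, PySem.Int.bxor_zero]
      rwa [he] at this
    · have hstep : pyReduceStep m bp = m := by
        unfold pyReduceStep; rw [if_neg (by simpa using hguard)]
      rw [hstep]
      exact .skip (ih m)

theorem reduce_clears {basis : List (Int × Nat)} (hg : Good basis) (hnn : ∀ bp ∈ basis, 0 ≤ bp.1) :
    ∀ m : Int, 0 ≤ m → ∀ bp ∈ basis, tbit (basis.foldl pyReduceStep m) bp.2 = false := by
  induction hg with
  | nil => intro m _ bp hbp; exact absurd hbp (List.not_mem_nil)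
  | @cons b q rest hb ht hlow hrest hgrest ih =>
    intro m hm bp hbp
    have hnnr : ∀ c ∈ rest, 0 ≤ c.1 := fun c hc => hnn c (List.mem_cons_of_mem _ hc)
    have hm' : 0 ≤ pyReduceStep m (b, q) := by
      unfold pyReduceStep
      split
      · exact pv_bxor_nonneg hm hb
      · exact hm
    simp only [List.foldl_cons]
    rcases List.mem_cons.mp hbp with rfl | hmem
    · -- pivot of the head: cleared by the step and never re-set by rest
      have hstep : tbit (pyReduceStep m (b, q)) q = false := by
        unfold pyReduceStep
        by_cases hguard : (PySem.Int.band (m >>> q) 1 == 1) = true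
        · rw [if_pos hguard, tbit_bxor hm hb, ht]
          rw [pv_guard_eq hm] at hguard
          rw [hguard]
          rfl
        · rw [if_neg (by simpa using hguard)]
          have := pv_guard_eq hm (k := q)
          rw [this] at hguard
          simpa using hguard
      set m' := pyReduceStep m (b, q) with hm'def
      have hr := reduce_insp rest m'
      set r := rest.foldl pyReduceStep m' with hrdef
      have hc : tbit (PySem.Int.bxor r m') q = false :=
        insp_tbit_false (K := rest.map Prod.fst)
          (by
            intro c hc
            rcases List.mem_map.mp hc with ⟨cp, hcp, rfl⟩
            exact ⟨hnnr cp hcp, hrest cp hcp⟩) hr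
      have hre : r = PySem.Int.bxor (PySem.Int.bxor r m') m' := by
        rw [pv_bxor_cancel_right]
      rw [hre, tbit_bxor (pv_bxor_nonneg (reduce_nonneg hnnr m' hm') hm') hm', hc, hstep]
      rfl
    · exact ih hnnr _ hm' bp hmem

theorem reduce_of_insp {basis : List (Int × Nat)} (hg : Good basis) (hnn : ∀ bp ∈ basis, 0 ≤ bp.1) :
    ∀ m : Int, 0 ≤ m → InSp (basis.map Prod.fst) m → basis.foldl pyReduceStep m = 0 := by
  induction hg with
  | nil =>
    intro m _ hm
    simp only [List.map_nil, insp_nil_iff] at hm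
    simpa using hm
  | @cons b q rest hb ht hlow hrest hgrest ih =>
    intro m hm hins
    have hnnr : ∀ c ∈ rest, 0 ≤ c.1 := fun c hc => hnn c (List.mem_cons_of_mem _ hc)
    have hKprop : ∀ c ∈ rest.map Prod.fst, 0 ≤ c ∧ tbit c q = false := by
      intro c hc
      rcases List.mem_map.mp hc with ⟨cp, hcp, rfl⟩
      exact ⟨hnnr cp hcp, hrest cp hcp⟩
    simp only [List.map_cons] at hins
    rw [insp_cons] at hins
    simp only [List.foldl_cons]
    rcases hins with hins | hins
    · have hguard : tbit m q = false := insp_tbit_false hKprop hins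
      have hstep : pyReduceStep m (b, q) = m := by
        unfold pyReduceStep
        rw [pv_guard_eq hm, hguard]
        simp
      rw [hstep]
      exact ih hnnr m hm hins
    · have hx : 0 ≤ PySem.Int.bxor m b := pv_bxor_nonneg hm hb
      have hguard : tbit m q = true := by
        have hmx : m = PySem.Int.bxor (PySem.Int.bxor m b) b := by rw [pv_bxor_cancel_right]
        rw [hmx, tbit_bxor hx hb, insp_tbit_false hKprop hins, ht]
        rfl
      have hstep : pyReduceStep m (b, q) = PySem.Int.bxor m b := by
        unfold pyReduceStep
        rw [pv_guard_eq hm, hguard]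
        simp
      rw [hstep]
      exact ih hnnr _ hx hins

-- ---- combined loop invariant of A's elimination pass and B's incremental pass ----
structure LoopInv (P : List Int) (basis : List (Int × Nat)) (sp : List Int) (dim : Int) : Prop where
  good : Good basis
  bnn : ∀ bp ∈ basis, 0 ≤ bp.1
  biff : ∀ x, InSp (basis.map Prod.fst) x ↔ InSp P x
  nodup : sp.Nodup
  spiff : ∀ x, x ∈ sp ↔ InSp P x
  dimEq : dim = (basis.length : Int)

theorem main_step {P : List Int} {basis : List (Int × Nat)} {sp : List Int} {dim : Int}
    (m : Int) (hm : 0 ≤ m) (h : LoopInv P basis sp dim) :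
    LoopInv (P ++ [m]) (elimFold basis m) (altStep (sp, dim) m).1 (altStep (sp, dim) m).2 := by
  by_cases hr : basis.foldl pyReduceStep m = 0
  · -- m is already in the span: both sides leave their state unchanged
    have hins : InSp (basis.map Prod.fst) m := by
      have := reduce_insp basis m
      rwa [hr, pv_bxor_zero_left] at this
    have hPm : InSp P m := (h.biff m).mp hins
    have hA : elimFold basis m = basis := by
      unfold elimFold
      simp [hr]
    have hmem : m ∈ sp := (h.spiff m).mpr hPm
    have hB : altStep (sp, dim) m = (sp, dim) := by
      unfold altStep
      rw [if_pos (by simpa [PySem.Set.contains_iff] using hmem)]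
    rw [hA, hB]
    exact ⟨h.good, h.bnn, fun x => (h.biff x).trans (insp_absorb hPm x).symm,
      h.nodup, fun x => (h.spiff x).trans (insp_absorb hPm x).symm, h.dimEq⟩
  · -- m is independent: A appends a pivot row, B doubles the span
    set r := basis.foldl pyReduceStep m with hrdef
    have hrn : 0 ≤ r := reduce_nonneg h.bnn m hm
    have hnotins : ¬ InSp P m := by
      intro hPm
      exact hr (reduce_of_insp h.good h.bnn m hm ((h.biff m).mpr hPm))
    have hnotmem : m ∉ sp := fun hmem => hnotins ((h.spiff m).mp hmem)
    have hA : elimFold basis m = basis ++ [(r, PySem.Int.bitLength (PySem.Int.band r (-r)) - 1)] := by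
      unfold elimFold
      simp [← hrdef, hr]
    have hB : altStep (sp, dim) m =
        (PySem.Set.union sp (PySem.Set.ofList (sp.map (fun w => PySem.Int.bxor w m))), dim + 1) := by
      unfold altStep
      rw [if_neg (by simpa [PySem.Set.contains_iff] using hnotmem)]
    rw [hA, hB]
    obtain ⟨hlow1, hlow2⟩ := pv_lowbit_spec hrn hr
    have hc : InSp P (PySem.Int.bxor r m) := (h.biff _).mp (reduce_insp basis m)
    refine ⟨?_, ?_, ?_, ?_, ?_, ?_⟩
    · exact good_append h.good hrn hlow1 hlow2 (reduce_clears h.good h.bnn m hm)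
    · intro bp hbp
      rcases List.mem_append.mp hbp with hmem | hmem
      · exact h.bnn bp hmem
      · rw [List.mem_singleton] at hmem; subst hmem; exact hrn
    · intro x
      rw [List.map_append, List.map_cons, List.map_nil, insp_append, insp_append,
        h.biff, h.biff]
      constructor
      · rintro (hx | hx)
        · exact Or.inl hx
        · right
          have := insp_xor hx hc
          have he : PySem.Int.bxor (PySem.Int.bxor x r) (PySem.Int.bxor r m)
              = PySem.Int.bxor x m := by
            rw [pv_bxor_assoc x r, ← pv_bxor_assoc r r, PySem.Int.bxor_self, pv_bxor_zero_left]
          rwa [he] at this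
      · rintro (hx | hx)
        · exact Or.inl hx
        · right
          have := insp_xor hx hc
          have he : PySem.Int.bxor (PySem.Int.bxor x m) (PySem.Int.bxor r m)
              = PySem.Int.bxor x r := by
            rw [PySem.Int.bxor_comm r m, pv_bxor_assoc x m, ← pv_bxor_assoc m m,
              PySem.Int.bxor_self, pv_bxor_zero_left]
          rwa [he] at this
    · exact PySem.Set.nodup_union _ _ h.nodup
    · intro x
      rw [PySem.Set.mem_union, PySem.Set.mem_ofList, insp_append]
      constructor
      · rintro (hx | hx)
        · exact Or.inl ((h.spiff x).mp hx)
        · rcases List.mem_map.mp hx with ⟨w, hw, rfl⟩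
          right
          have : PySem.Int.bxor (PySem.Int.bxor w m) m = w := pv_bxor_cancel_right w m
          rw [this]
          exact (h.spiff w).mp hw
      · rintro (hx | hx)
        · exact Or.inl ((h.spiff x).mpr hx)
        · right
          refine List.mem_map.mpr ⟨PySem.Int.bxor x m, (h.spiff _).mpr hx, ?_⟩
          exact pv_bxor_cancel_right x m
    · rw [h.dimEq]
      simp

theorem main_fold (L : List Int) :
    ∀ (P : List Int) (basis : List (Int × Nat)) (sd : List Int × Int),
      (∀ m ∈ L, 0 ≤ m) → LoopInv P basis sd.1 sd.2 →
      LoopInv (P ++ L) (L.foldl elimFold basis) (L.foldl altStep sd).1 (L.foldl altStep sd).2 := by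
  induction L with
  | nil => intro P basis sd _ h; simpa using h
  | cons m L ih =>
    intro P basis sd hnn h
    have hstep := main_step m (hnn m List.mem_cons_self) h
    have := ih (P ++ [m]) (elimFold basis m) (altStep (sd.1, sd.2) m)
      (fun c hc => hnn c (List.mem_cons_of_mem _ hc)) hstep
    simpa using this

-- ---- membership of A's span-enumeration phase ----
theorem span_mem (basis : List (Int × Nat)) :
    ∀ (s : List Int) (x : Int),
      x ∈ basis.foldl (fun ms bp => spanStep ms bp.1) s ↔
        ∃ w ∈ s, InSp (basis.map Prod.fst) (PySem.Int.bxor x w) := by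
  induction basis with
  | nil =>
    intro s x
    simp only [List.foldl_nil, List.map_nil, insp_nil_iff, pv_bxor_eq_zero_iff]
    constructor
    · intro hx; exact ⟨x, hx, rfl⟩
    · rintro ⟨w, hw, rfl⟩; exact hw
  | cons bp basis ih =>
    intro s x
    simp only [List.foldl_cons, List.map_cons]
    rw [ih]
    unfold spanStep
    constructor
    · rintro ⟨w, hw, hins⟩
      rw [PySem.Set.mem_union, PySem.Set.mem_ofList] at hw
      rcases hw with hw | hw
      · exact ⟨w, hw, .skip hins⟩
      · rcases List.mem_map.mp hw with ⟨w0, hw0, rfl⟩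
        refine ⟨w0, hw0, ?_⟩
        rw [insp_cons]
        right
        have he : PySem.Int.bxor (PySem.Int.bxor x w0) bp.1
            = PySem.Int.bxor x (PySem.Int.bxor w0 bp.1) := pv_bxor_assoc x w0 bp.1
        rwa [← he] at hins
    · rintro ⟨w, hw, hins⟩
      rw [insp_cons] at hins
      rcases hins with hins | hins
      · exact ⟨w, by rw [PySem.Set.mem_union]; exact Or.inl hw, hins⟩
      · refine ⟨PySem.Int.bxor w bp.1, ?_, ?_⟩
        · rw [PySem.Set.mem_union, PySem.Set.mem_ofList]
          exact Or.inr (List.mem_map.mpr ⟨w, hw, rfl⟩)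
        · rwa [← pv_bxor_assoc]

theorem span_nodup (basis : List (Int × Nat)) :
    ∀ s : List Int, s.Nodup → (basis.foldl (fun ms bp => spanStep ms bp.1) s).Nodup := by
  induction basis with
  | nil => intro s hs; exact hs
  | cons bp basis ih =>
    intro s hs
    exact ih _ (PySem.Set.nodup_union _ _ hs)

-- ---- the incidence masks are nonnegative ----
theorem pyGetD_zero_nonneg {out : List Int} (hout : ∀ x ∈ out, 0 ≤ x) (u : Int) :
    0 ≤ PySem.List.pyGetD out u 0 := by
  unfold PySem.List.pyGetD
  cases hg : PySem.List.pyGet? out u with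
  | none => simp
  | some y =>
    simp only [Option.getD_some]
    exact hout y (PySem.List.mem_of_pyGet?_eq_some _ hg)

theorem pySetD_nonneg {out : List Int} {v : Int} (hout : ∀ x ∈ out, 0 ≤ x) (hv : 0 ≤ v)
    (u : Int) : ∀ x ∈ PySem.List.pySetD out u v, 0 ≤ x := by
  intro x hx
  unfold PySem.List.pySetD PySem.List.pySet? at hx
  cases hg : PySem.List.pyIdx? out.length u with
  | none => rw [hg] at hx; simp at hx; exact hout x hx
  | some k =>
    rw [hg] at hx
    simp only [Option.map_some, Option.getD_some] at hx
    rcases List.mem_or_eq_of_mem_set hx with hmem | rfl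
    · exact hout x hmem
    · exact hv

theorem incStep_nonneg {out : List Int} (hout : ∀ x ∈ out, 0 ≤ x) (iuv : Int × (Int × Int)) :
    ∀ x ∈ incStep out iuv, 0 ≤ x := by
  obtain ⟨i, u, v⟩ := iuv
  have hbor : ∀ a b : Int, 0 ≤ a → 0 ≤ b → 0 ≤ PySem.Int.bor a b := by
    intro a b ha hb
    rw [PySem.Int.bor_of_nonneg ha hb]
    positivity
  have hshift : (0 : Int) ≤ 1 <<< i.toNat := Int.natCast_nonneg (1 <<< i.toNat)
  unfold incStep
  have hout1 := pySetD_nonneg hout (hbor _ _ (pyGetD_zero_nonneg hout u) hshift) u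
  exact pySetD_nonneg hout1 (hbor _ _ (pyGetD_zero_nonneg hout1 v) hshift) v

theorem inc_fold_nonneg (l : List (Int × (Int × Int))) :
    ∀ out : List Int, (∀ x ∈ out, 0 ≤ x) → ∀ x ∈ l.foldl incStep out, 0 ≤ x := by
  induction l with
  | nil => intro out hout; exact hout
  | cons iuv l ih =>
    intro out hout
    rw [List.foldl_cons]
    exact ih _ (incStep_nonneg hout iuv)

theorem incidence_nonneg (n : Int) (edges : List (Int × Int)) :
    ∀ x ∈ vertex_coboundary_basis n edges, 0 ≤ x := by
  unfold vertex_coboundary_basis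
  refine inc_fold_nonneg _ _ ?_
  intro x hx
  rcases List.eq_of_mem_replicate hx with rfl
  omega

-- ===== VERDICT (by name: the statement is the Claim_ definition above) =====
theorem all_coboundaries_set_spec : Claim_equal_all_coboundaries_set := by
  unfold Claim_equal_all_coboundaries_set
  intro n edges _ _
  unfold Spec_all_coboundaries_set
  unfold all_coboundaries_set all_coboundaries_set_alt
  have hstepEq : altIncStep = incStep := rfl
  have hinc : alt_incidence n edges = vertex_coboundary_basis n edges := by
    unfold alt_incidence vertex_coboundary_basis
    rw [hstepEq]
  rw [hinc]
  set L := vertex_coboundary_basis n edges with hL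
  have hnn : ∀ m ∈ L, 0 ≤ m := incidence_nonneg n edges
  have hbase : LoopInv ([] : List Int) [] (PySem.Set.ofList [0]) 0 := by
    refine ⟨.nil, by simp, fun x => Iff.rfl, PySem.Set.nodup_ofList [0], ?_, by simp⟩
    intro x
    rw [PySem.Set.mem_ofList]
    simp [insp_nil_iff]
  have hInv := main_fold L [] [] (PySem.Set.ofList [0], 0) hnn hbase
  simp only [List.nil_append] at hInv
  refine Prod.ext ?_ ?_
  · simp only
    rw [PySem.List.sorted_id_eq_sorted_id_iff_perm]
    rw [List.perm_ext_iff_of_nodup (span_nodup _ _ (PySem.Set.nodup_ofList [0])) hInv.nodup]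
    intro x
    rw [span_mem, hInv.spiff]
    constructor
    · rintro ⟨w, hw, hins⟩
      rw [PySem.Set.mem_ofList] at hw
      simp at hw
      subst hw
      rw [PySem.Int.bxor_zero] at hins
      exact (hInv.biff x).mp hins
    · intro hx
      refine ⟨0, by rw [PySem.Set.mem_ofList]; simp, ?_⟩
      rw [PySem.Int.bxor_zero]
      exact (hInv.biff x).mpr hx
  · simpa using hInv.dimEq.symm
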